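-- pv_equiv track=rewrite | github.com/lujiajie12/LiveAgentStudio | backend/app/agents/qa_agent.py | _latest_memory_turn
-- ===== SOURCE A (Python) =====
-- def _latest_memory_turn(turns: list[dict[str, str]], role: str) -> str:
--     return next(
--         (
--             str(item.get("content", "")).strip()
--             for item in reversed(turns)
--             if str(item.get("role", "")).strip() == role and str(item.get("content", "")).strip()
--         ),
--         "",
--     )
-- ===== SOURCE B (Python) =====
-- def _latest_memory_turn(turns: list[dict[str, str]], role: str) -> str:
--     result = ""
--     for item in turns:
--         content = str(item.get("content", "")).strip()
--         if str(item.get("role", "")).strip() == role and content: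
--             result = content
--     return result
-- ===== Notes on version B (the rewrite author's own statement) =====
-- stated objective: alternative
-- what changed: Replaced the reversed-generator-with-next early-exit search by a forward single pass that keeps overwriting an accumulator with the latest qualifying stripped content.
import Mathlib
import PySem

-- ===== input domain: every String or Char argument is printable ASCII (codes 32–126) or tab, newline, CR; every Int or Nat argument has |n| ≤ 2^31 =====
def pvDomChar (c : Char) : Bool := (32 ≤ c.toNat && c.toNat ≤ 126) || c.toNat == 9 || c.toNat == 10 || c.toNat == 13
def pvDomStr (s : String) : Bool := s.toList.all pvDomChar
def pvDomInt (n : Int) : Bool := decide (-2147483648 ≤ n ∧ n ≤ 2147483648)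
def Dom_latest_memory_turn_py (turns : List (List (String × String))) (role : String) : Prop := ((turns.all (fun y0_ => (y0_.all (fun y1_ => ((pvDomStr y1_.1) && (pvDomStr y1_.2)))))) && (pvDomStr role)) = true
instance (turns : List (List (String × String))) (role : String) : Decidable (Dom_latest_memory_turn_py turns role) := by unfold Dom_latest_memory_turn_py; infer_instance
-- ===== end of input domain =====

-- ===== PORT A =====
-- B replaces A's reversed-generator early-exit search by a forward accumulator pass (alternative decomposition, same cost).
-- A: next((strip(content) for item in reversed(turns) if strip(role')==role and strip(content)), "")
def pvGet (item : List (String × String)) (k : String) : String :=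
  (PySem.Dict.ofList item).getD k ""

def pvGoA (role : String) : List (List (String × String)) → String
  | [] => ""
  | item :: rest =>
    let c := PySem.Str.strip (pvGet item "content")
    if PySem.Str.strip (pvGet item "role") = role ∧ c ≠ "" then c
    else pvGoA role rest

def latest_memory_turn_py (turns : List (List (String × String))) (role : String) : String :=
  pvGoA role turns.reverse

-- ===== PORT B =====
-- B: result = ""; for item in turns: if strip(role')==role and strip(content): result = strip(content); return result
def latest_memory_turn_py_alt (turns : List (List (String × String))) (role : String) : String :=
  turns.foldl (fun result item =>
    let content := PySem.Str.strip (pvGet item "content")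
    if PySem.Str.strip (pvGet item "role") = role ∧ content ≠ "" then content
    else result) ""

-- ===== PRECONDITION & SPEC =====
def Spec_latest_memory_turn_py (turns : List (List (String × String))) (role : String) (out : String) : Prop := out = latest_memory_turn_py_alt turns role
instance (turns : List (List (String × String))) (role : String) (out : String) : Decidable (Spec_latest_memory_turn_py turns role out) := by unfold Spec_latest_memory_turn_py; infer_instance

-- ===== CLAIM =====
def Claim_equal_latest_memory_turn_py : Prop := ∀ (turns : List (List (String × String))) (role : String), Dom_latest_memory_turn_py turns role → Spec_latest_memory_turn_py turns role (latest_memory_turn_py turns role)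

-- ===== LEMMAS AND PROOFS =====
-- pvGoA returns "" exactly when no element qualifies, so the first-qualifying search over an
-- append can be split at the seam:
theorem pvGoA_append (role : String) (xs ys : List (List (String × String))) :
    pvGoA role (xs ++ ys) = if pvGoA role xs = "" then pvGoA role ys else pvGoA role xs := by
  induction xs with
  | nil => simp [pvGoA]
  | cons item rest ih =>
    simp only [List.cons_append, pvGoA]
    split_ifs with h1 h2 h3 <;> simp_all

-- the forward fold computes the last qualifying stripped content, i.e. the first over reverse
theorem foldl_eq_goA (role : String) (turns : List (List (String × String))) : ∀ (a : String),
    turns.foldl (fun result item =>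
      let content := PySem.Str.strip (pvGet item "content")
      if PySem.Str.strip (pvGet item "role") = role ∧ content ≠ "" then content
      else result) a
    = if pvGoA role turns.reverse = "" then a else pvGoA role turns.reverse := by
  induction turns with
  | nil => intro a; simp [pvGoA]
  | cons item rest ih =>
    intro a
    simp only [List.foldl_cons, List.reverse_cons, pvGoA_append, ih]
    have hsingle : pvGoA role [item]
        = (if PySem.Str.strip (pvGet item "role") = role ∧
              PySem.Str.strip (pvGet item "content") ≠ "" then
            PySem.Str.strip (pvGet item "content") else "") := by
      simp [pvGoA]
    split_ifs with h1 h2 <;> simp_all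

-- ===== VERDICT =====
theorem latest_memory_turn_py_spec : Claim_equal_latest_memory_turn_py := by
  intro turns role _
  unfold Spec_latest_memory_turn_py latest_memory_turn_py latest_memory_turn_py_alt
  rw [foldl_eq_goA]
  split_ifs with h <;> simp [h]
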